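-- pv_equiv track=rewrite | github.com/depixusgenome/trackanalysis | src/utils/gui.py | leastcommonkeys
-- ===== SOURCE A (Python) =====
-- from   typing      import Set, Union, Optional, Sequence, Dict, cast
--
-- def leastcommonkeys(info, tail = ', ...') -> Dict[str, str]:
--     "return simpler names for a list of track files"
--     if not isinstance(info, dict):
--         info = {i: i for i in info}
--     if len(info) == 1:
--         return info
--
--     tails  = {i for i, j in info.items() if j.endswith(tail)}
--     dflt   = {i: (j[:-len(tail)] if j.endswith(tail) else j) for i, j in info.items()}
--     keys   = {i: j.split('_')                                for i, j in dflt.items()}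
--     common = None
--     for i in keys.values():
--         common = set(i) if common is None else set(i) & cast(set, common)
--
--     if common:
--         keys = {i:'_'.join(k for k in j if k not in common) for i, j in keys.items()}
--     else:
--         keys = {i:'_'.join(k for k in j) for i, j in keys.items()}
--
--     empties = sum(1 for i in keys.values() if i == '')
--     if empties == 1:
--         keys[next(i for i, j in keys.items() if j == '')] = 'ref'
--     elif empties > 1:
--         keys.update({i: dflt[i] for i, j in keys.items() if j == ''})
--     return {i: j+(tail if i in tails else '') for i, j in keys.items()}
-- ===== SOURCE B (Python) =====
-- def leastcommonkeys(info, tail=', ...'):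
--     "return simpler names for a list of track files"
--     if not isinstance(info, dict):
--         info = {i: i for i in info}
--     if len(info) == 1:
--         return info
--
--     n = len(info)
--     counts = {}
--     parts = {}
--     for i, j in info.items():
--         had = j.endswith(tail)
--         stripped = j[:-len(tail)] if had else j
--         toks = stripped.split('_')
--         parts[i] = (toks, had, stripped)
--         for t in set(toks):
--             counts[t] = counts.get(t, 0) + 1
--     common = {t for t, c in counts.items() if c == n}
--
--     out = {i: ('_'.join(t for t in toks if t not in common), had, stripped)
--            for i, (toks, had, stripped) in parts.items()}
--     blanks = sum(1 for name, _, _ in out.values() if name == '')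
--     if blanks == 1:
--         out = {i: ('ref' if name == '' else name, had, stripped)
--                for i, (name, had, stripped) in out.items()}
--     elif blanks > 1:
--         out = {i: (stripped if name == '' else name, had, stripped)
--                for i, (name, had, stripped) in out.items()}
--     return {i: name + (tail if had else '') for i, (name, had, _) in out.items()}
-- ===== Notes on version B (the rewrite author's own statement) =====
-- stated objective: alternative
-- what changed: Replaces A's four separate dict comprehensions (tails/dflt/keys) and the iterative set-intersection fold by one fused pass that splits each name and counts each distinct token once per name, taking as common exactly the tokens counted len(info) times; the empties fix-up reuses the stripped name carried along instead of a dflt lookup.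
import Mathlib
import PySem

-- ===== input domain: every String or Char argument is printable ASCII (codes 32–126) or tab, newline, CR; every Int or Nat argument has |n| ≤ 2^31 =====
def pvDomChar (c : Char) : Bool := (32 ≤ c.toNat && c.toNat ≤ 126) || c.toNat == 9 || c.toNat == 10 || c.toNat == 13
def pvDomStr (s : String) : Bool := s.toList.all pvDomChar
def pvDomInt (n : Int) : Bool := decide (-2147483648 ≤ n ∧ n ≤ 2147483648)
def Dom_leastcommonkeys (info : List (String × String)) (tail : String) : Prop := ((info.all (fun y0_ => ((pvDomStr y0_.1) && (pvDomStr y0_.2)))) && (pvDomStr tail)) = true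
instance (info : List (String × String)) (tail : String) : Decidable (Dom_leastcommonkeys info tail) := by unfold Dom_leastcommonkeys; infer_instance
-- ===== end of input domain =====

-- B replaces A's repeated set-intersection fold (and the tails/dflt/keys dicts) by a pass that
-- counts each of a name's distinct tokens once, taking as common the tokens counted len(info)
-- times, and reuses the stripped name it carries instead of A's dflt lookup (objective:
-- alternative decomposition, same cost).  Each Python local variable is one `lck…` definition.

-- ===== PORT A =====
-- per-entry expressions of the Python shared verbatim by A and B:
-- `j.endswith(tail)`, `j[:-len(tail)] if j.endswith(tail) else j`, `….split('_')`
def lckHad (tail : String) (p : String × String) : Bool := PySem.Str.endswith p.2 tail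

def lckStrip (tail : String) (p : String × String) : String :=
  if lckHad tail p then PySem.Str.slice p.2 none (some (-(PySem.Str.len tail))) else p.2

def lckTok (tail : String) (p : String × String) : List String :=
  (PySem.Str.split? (lckStrip tail p) "_").getD []

-- info is a Python dict (distinct keys, Pre_): its dict comprehensions are maps over the assoc list
-- `tails = {i for i, j in info.items() if j.endswith(tail)}`
def lckTails (info : List (String × String)) (tail : String) : PySem.Set String :=
  PySem.Set.ofList ((info.filter (fun p => PySem.Str.endswith p.2 tail)).map (·.1))

-- `dflt = {i: (j[:-len(tail)] if j.endswith(tail) else j) for i, j in info.items()}`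
def lckDflt (info : List (String × String)) (tail : String) : List (String × String) :=
  info.map (fun p => (p.1, lckStrip tail p))

-- `keys = {i: j.split('_') for i, j in dflt.items()}`
def lckKeysA (info : List (String × String)) (tail : String) : List (String × List String) :=
  (lckDflt info tail).map (fun p => (p.1, (PySem.Str.split? p.2 "_").getD []))

-- `common = set(i) if common is None else set(i) & common` fold
def lckCommonFold (keys : List (String × List String)) : Option (PySem.Set String) :=
  keys.foldl (fun c p => match c with
    | none => some (PySem.Set.ofList p.2)
    | some s => some (PySem.Set.inter (PySem.Set.ofList p.2) s)) none

-- `keys = {i: '_'.join(…) …}` (both branches of `if common:`)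
def lckKeys2 (info : List (String × String)) (tail : String) : List (String × String) :=
  let keys := lckKeysA info tail
  let common := lckCommonFold keys
  if (match common with | none => false | some s => !s.isEmpty) then
    keys.map (fun p => (p.1, PySem.Str.join "_" (p.2.filter (fun k => !((common.getD []).contains k)))))
  else
    keys.map (fun p => (p.1, PySem.Str.join "_" p.2))

-- `empties = sum(1 for i in keys.values() if i == '')`
def lckEmpties (info : List (String × String)) (tail : String) : Nat :=
  ((lckKeys2 info tail).filter (fun p => p.2 == "")).length

-- `keys[next(i for i, j in keys.items() if j == '')] = 'ref'` : overwrite the first ''-valued entry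
def lckRefFirst : List (String × String) → List (String × String)
  | [] => []
  | p :: rest => if p.2 == "" then (p.1, "ref") :: rest else p :: lckRefFirst rest

-- the `empties` branches (`keys.update` rewrites ''-valued entries in place via a dflt lookup)
def lckKeys3 (info : List (String × String)) (tail : String) : List (String × String) :=
  if lckEmpties info tail == 1 then lckRefFirst (lckKeys2 info tail)
  else if 1 < lckEmpties info tail then
    (lckKeys2 info tail).map (fun p =>
      if p.2 == "" then (p.1, (PySem.Dict.mk (lckDflt info tail)).getD p.1 "") else p)
  else lckKeys2 info tail

-- `return {i: j + (tail if i in tails else '') for i, j in keys.items()}`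
def leastcommonkeys (info : List (String × String)) (tail : String) : List (String × String) :=
  if info.length == 1 then info else
  (lckKeys3 info tail).map (fun p =>
    (p.1, p.2 ++ (if PySem.Set.contains (lckTails info tail) p.1 then tail else "")))

-- ===== PORT B =====
-- Source B's single loop fills `parts` and `counts`, two independent accumulators: ported as the map
-- building parts and the fold building counts (PySem.List.foldl_prod_mk's decomposition)
def lckParts (info : List (String × String)) (tail : String) :
    List (String × (List String × Bool × String)) :=
  info.map (fun p => (p.1, (lckTok tail p, lckHad tail p, lckStrip tail p)))

-- `counts[t] = counts.get(t, 0) + 1` over each name's distinct tokens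
def lckCounts (info : List (String × String)) (tail : String) : PySem.Dict String Int :=
  (lckParts info tail).foldl
    (fun d q => (PySem.Set.ofList q.2.1).foldl (fun d t => d.modify t 0 (· + 1)) d)
    PySem.Dict.empty

-- `common = {t for t, c in counts.items() if c == n}`
def lckCommon (info : List (String × String)) (tail : String) : List String :=
  ((lckCounts info tail).items.filter (fun q => q.2 == (info.length : Int))).map (·.1)

-- `out = {i: ('_'.join(t for t in toks if t not in common), had, stripped) …}`
def lckOut (info : List (String × String)) (tail : String) :
    List (String × (String × Bool × String)) :=
  (lckParts info tail).map (fun q =>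
    (q.1, (PySem.Str.join "_" (q.2.1.filter (fun t => !((lckCommon info tail).contains t))),
           q.2.2.1, q.2.2.2)))

-- `blanks = sum(1 for name, _, _ in out.values() if name == '')`
def lckBlanks (info : List (String × String)) (tail : String) : Nat :=
  ((lckOut info tail).filter (fun q => q.2.1 == "")).length

-- the `blanks` branches
def lckOut2 (info : List (String × String)) (tail : String) :
    List (String × (String × Bool × String)) :=
  if lckBlanks info tail == 1 then
    (lckOut info tail).map (fun q => (q.1, ((if q.2.1 == "" then "ref" else q.2.1), q.2.2)))
  else if 1 < lckBlanks info tail then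
    (lckOut info tail).map (fun q => (q.1, ((if q.2.1 == "" then q.2.2.2 else q.2.1), q.2.2)))
  else lckOut info tail

-- `return {i: name + (tail if had else '') …}`
def leastcommonkeys_alt (info : List (String × String)) (tail : String) : List (String × String) :=
  if info.length == 1 then info else
  (lckOut2 info tail).map (fun q => (q.1, q.2.1 ++ (if q.2.2.1 then tail else "")))

-- ===== PRECONDITION & SPEC =====
-- Pre_ excludes association lists with duplicate keys: the argument is a Python dict, which cannot
-- contain them, so such lists represent no actual input of A.
def Pre_leastcommonkeys (info : List (String × String)) (tail : String) : Prop :=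
  (info.map Prod.fst).Nodup
instance (info : List (String × String)) (tail : String) : Decidable (Pre_leastcommonkeys info tail) := by
  unfold Pre_leastcommonkeys; infer_instance

def pvWitness_leastcommonkeys : (List (String × String)) × String :=
  ([("a", "x_y, ..."), ("b", "x_z")], ", ...")

def Spec_leastcommonkeys (info : List (String × String)) (tail : String) (out : List (String × String)) : Prop := out = leastcommonkeys_alt info tail
instance (info : List (String × String)) (tail : String) (out : List (String × String)) : Decidable (Spec_leastcommonkeys info tail out) := by unfold Spec_leastcommonkeys; infer_instance

-- ===== CLAIM (what is proved, stated in full; the proofs are below) =====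
def Claim_equal_leastcommonkeys : Prop := ∀ (info : List (String × String)) (tail : String), Dom_leastcommonkeys info tail → Pre_leastcommonkeys info tail → Spec_leastcommonkeys info tail (leastcommonkeys info tail)

-- ===== LEMMAS AND PROOFS =====

-- the simplified name of one entry, in B's vocabulary
def lckName (info : List (String × String)) (tail : String) (p : String × String) : String :=
  PySem.Str.join "_" ((lckTok tail p).filter (fun t => !((lckCommon info tail).contains t)))

-- A's intersection fold: membership characterisation
theorem lckCommonFold_some_aux (l : List (String × List String)) (s : PySem.Set String) :
    ∃ c, l.foldl (fun c p => match c with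
        | none => some (PySem.Set.ofList p.2)
        | some s => some (PySem.Set.inter (PySem.Set.ofList p.2) s)) (some s) = some c ∧
      ∀ t, t ∈ c ↔ (t ∈ s ∧ ∀ q ∈ l, t ∈ q.2) := by
  induction l generalizing s with
  | nil => exact ⟨s, rfl, by simp⟩
  | cons q l ih =>
    obtain ⟨c, hc, hm⟩ := ih (PySem.Set.inter (PySem.Set.ofList q.2) s)
    refine ⟨c, hc, fun t => ?_⟩
    rw [hm t]
    simp [PySem.Set.mem_inter, PySem.Set.mem_ofList]
    tauto

theorem lckCommonFold_some (l : List (String × List String)) (hl : l ≠ []) :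
    ∃ c, lckCommonFold l = some c ∧ ∀ t, t ∈ c ↔ ∀ q ∈ l, t ∈ q.2 := by
  cases l with
  | nil => exact absurd rfl hl
  | cons q l =>
    obtain ⟨c, hc, hm⟩ := lckCommonFold_some_aux l (PySem.Set.ofList q.2)
    refine ⟨c, hc, fun t => ?_⟩
    rw [hm t]
    simp [PySem.Set.mem_ofList]

-- distinct-token count of one name
theorem count_ofList (ts : List String) (t : String) :
    (PySem.Set.ofList ts).count t = if ts.contains t then 1 else 0 := by
  have hnd := PySem.Set.nodup_ofList (xs := ts)
  by_cases h : t ∈ ts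
  · have hmem : t ∈ PySem.Set.ofList ts := (PySem.Set.mem_ofList _ _).2 h
    have h1 : (PySem.Set.ofList ts).count t ≤ 1 := List.nodup_iff_count_le_one.1 hnd t
    have h2 : 0 < (PySem.Set.ofList ts).count t := List.count_pos_iff.2 hmem
    rw [if_pos (List.contains_iff_mem.2 h)]
    omega
  · have : t ∉ PySem.Set.ofList ts := fun hc => h ((PySem.Set.mem_ofList _ _).1 hc)
    rw [List.count_eq_zero.2 this, if_neg (by simpa using h)]

-- B's counter: value at t = number of entries whose token list contains t
theorem lckCounts_getD_aux (l : List (String × (List String × Bool × String)))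
    (d : PySem.Dict String Int) (t : String) :
    (l.foldl (fun d q => (PySem.Set.ofList q.2.1).foldl (fun d t => d.modify t 0 (· + 1)) d) d).getD t 0
      = d.getD t 0 + (l.countP (fun q => q.2.1.contains t) : Int) := by
  induction l generalizing d with
  | nil => simp
  | cons q l ih =>
    rw [List.foldl_cons, ih, PySem.Dict.getD_foldl_modify_add_one, count_ofList,
      List.countP_cons]
    by_cases h : q.2.1.contains t = true
    · simp [h]; ring
    · simp [h]; ring

theorem lckCounts_getD (info : List (String × String)) (tail : String) (t : String) :
    (lckCounts info tail).getD t 0 = (info.countP (fun p => (lckTok tail p).contains t) : Int) := by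
  rw [lckCounts, lckCounts_getD_aux, lckParts, List.countP_map]
  simp
  rfl

theorem lckCounts_keys_nodup (info : List (String × String)) (tail : String) :
    (lckCounts info tail).keys.Nodup := by
  rw [lckCounts]
  generalize hd : (PySem.Dict.empty : PySem.Dict String Int) = d
  have hnd : d.keys.Nodup := by rw [← hd]; exact PySem.Dict.nodup_keys_empty
  clear hd
  induction (lckParts info tail) generalizing d with
  | nil => exact hnd
  | cons p l ih =>
    exact ih _ (PySem.Dict.nodup_keys_foldl_modify_key _ (fun t => t) 0 (fun _ _ => (· + 1)) d hnd)

-- membership in B's common = token occurs in every entry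
theorem lckCommon_mem (info : List (String × String)) (tail : String) (t : String)
    (h0 : info ≠ []) :
    (lckCommon info tail).contains t = true ↔ ∀ p ∈ info, t ∈ lckTok tail p := by
  have hn : 0 < info.length := List.length_pos_iff.2 h0
  constructor
  · intro hc
    obtain ⟨q, hq, he⟩ := List.mem_map.1 (List.contains_iff_mem.1 hc)
    have hq' := List.mem_filter.1 hq
    have hv : q.2 = (info.length : Int) := by simpa using hq'.2
    have hitem : (t, (info.length : Int)) ∈ (lckCounts info tail).items := by
      rw [← he, ← hv]; exact hq'.1
    have hget : (lckCounts info tail).get? t = some (info.length : Int) :=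
      (PySem.Dict.get?_eq_some_iff_mem_items _ _ _ (lckCounts_keys_nodup info tail)).2 hitem
    have hgd : (lckCounts info tail).getD t 0 = (info.length : Int) := by
      rw [PySem.Dict.getD_eq_get?_getD, hget]; rfl
    rw [lckCounts_getD] at hgd
    have hcount : info.countP (fun p => (lckTok tail p).contains t) = info.length := by
      exact_mod_cast hgd
    intro p hp
    exact List.contains_iff_mem.1 (List.countP_eq_length.1 hcount p hp)
  · intro hall
    have hcount : info.countP (fun p => (lckTok tail p).contains t) = info.length :=
      List.countP_eq_length.2 (fun p hp => List.contains_iff_mem.2 (hall p hp))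
    have hgd : (lckCounts info tail).getD t 0 = (info.length : Int) := by
      rw [lckCounts_getD, hcount]
    cases hget : (lckCounts info tail).get? t with
    | none =>
      rw [PySem.Dict.getD_eq_get?_getD, hget] at hgd
      simp at hgd
      omega
    | some v =>
      have hv : v = (info.length : Int) := by
        rw [PySem.Dict.getD_eq_get?_getD, hget] at hgd
        simpa using hgd
      subst hv
      have hitem := (PySem.Dict.get?_eq_some_iff_mem_items _ _ _
        (lckCounts_keys_nodup info tail)).1 hget
      apply List.contains_iff_mem.2
      apply List.mem_map.2
      exact ⟨(t, (info.length : Int)), List.mem_filter.2 ⟨hitem, by simp⟩, rfl⟩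

-- dict built by mapping values over an assoc list with distinct keys: lookup of a member
theorem getD_mk_map {α : Type} (f : String × String → α) (d0 : α) :
    ∀ (info : List (String × String)), (info.map Prod.fst).Nodup →
      ∀ p ∈ info, (PySem.Dict.mk (info.map (fun r => (r.1, f r)))).getD p.1 d0 = f p := by
  intro info
  induction info with
  | nil => intro _ p hp; cases hp
  | cons q l ih =>
    intro h p hp
    rw [List.map_cons, List.nodup_cons] at h
    rw [List.map_cons, PySem.Dict.getD_eq_get?_getD, PySem.Dict.get?_mk_cons]
    by_cases he : (q.1 == p.1) = true
    · have hqp : p = q := by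
        rcases List.mem_cons.1 hp with hp1 | hp1
        · exact hp1
        · exact absurd (by simpa [eq_of_beq he] using List.mem_map_of_mem (f := Prod.fst) hp1) h.1
      simp [hqp]
    · have hp' : p ∈ l := by
        rcases List.mem_cons.1 hp with hp1 | hp1
        · exact absurd (by simp [hp1]) he
        · exact hp1
      rw [if_neg (by simpa using he), ← PySem.Dict.getD_eq_get?_getD]
      exact ih h.2 p hp'

-- unique keys: two members with the same key are equal
theorem lck_key_eq (info : List (String × String)) (h : (info.map Prod.fst).Nodup)
    {p q : String × String} (hp : p ∈ info) (hq : q ∈ info) (he : q.1 = p.1) : q = p := by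
  have := List.inj_on_of_nodup_map h
  exact this hq hp he

-- tails-set membership = this entry ends with tail (distinct keys)
theorem lck_tails_mem (info : List (String × String)) (tail : String)
    (h : (info.map Prod.fst).Nodup) (p : String × String) (hp : p ∈ info) :
    PySem.Set.contains (lckTails info tail) p.1 = lckHad tail p := by
  rw [lckTails]
  by_cases hh : lckHad tail p = true
  · have : p.1 ∈ (info.filter (fun p => PySem.Str.endswith p.2 tail)).map (·.1) :=
      List.mem_map_of_mem (List.mem_filter.2 ⟨hp, hh⟩)
    rw [hh]
    exact (PySem.Set.contains_iff _ _).2 ((PySem.Set.mem_ofList _ _).2 this)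
  · rw [Bool.not_eq_true] at hh
    rw [hh]
    rw [Bool.eq_false_iff]
    intro hc
    have := (PySem.Set.mem_ofList _ _).1 ((PySem.Set.contains_iff _ _).1 hc)
    obtain ⟨q, hq, he⟩ := List.mem_map.1 this
    have hq' := List.mem_filter.1 hq
    have := lck_key_eq info h hp hq'.1 he
    rw [this] at hq'
    rw [lckHad] at hh
    have hh' : PySem.Chars.endswith p.2.toList tail.toList = false := by
      simpa [PySem.Str.endswith] using hh
    simp [hh'] at hq'

-- the 'exactly one empty' overwrite = replace-all-empties map
theorem lckRefFirst_eq (l : List (String × String))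
    (h : l.countP (fun p => p.2 == "") = 1) :
    lckRefFirst l = l.map (fun p => if p.2 == "" then (p.1, "ref") else p) := by
  induction l with
  | nil => rfl
  | cons p l ih =>
    rw [List.countP_cons] at h
    by_cases hp : (p.2 == "") = true
    · have h0 : l.countP (fun p => p.2 == "") = 0 := by
        have : (if (p.2 == "") = true then 1 else 0) = 1 := by simp [hp]
        omega
      have hmap : l.map (fun p => if p.2 == "" then (p.1, "ref") else p) = l := by
        conv_rhs => rw [← List.map_id l]
        apply List.map_congr_left
        intro q hq
        have hq2 : ¬(q.2 == "") = true := by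
          intro hc
          have := List.countP_eq_zero.1 h0 q hq
          simp [hc] at this
        simp [hq2]
      have e1 : lckRefFirst (p :: l) = (p.1, "ref") :: l := by
        simp [lckRefFirst, hp]
      rw [e1, List.map_cons, hmap]
      simp [hp]
    · have h1 : l.countP (fun p => p.2 == "") = 1 := by
        have : (if (p.2 == "") = true then 1 else 0) = 0 := by simp [hp]
        omega
      have e1 : lckRefFirst (p :: l) = p :: lckRefFirst l := by
        simp [lckRefFirst, hp]
      rw [List.map_cons, e1, ih h1]
      simp [hp]

-- A's keys2 (whichever branch of `if common:` is taken) = filter by B's common, per entry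
theorem lckKeys2_eq (info : List (String × String)) (tail : String) (h0 : info ≠ []) :
    lckKeys2 info tail = info.map (fun p => (p.1, lckName info tail p)) := by
  have hK : lckKeysA info tail = info.map (fun p => (p.1, lckTok tail p)) := by
    rw [lckKeysA, lckDflt, List.map_map]; rfl
  obtain ⟨c, hc, hcm⟩ := lckCommonFold_some (info.map (fun p => (p.1, lckTok tail p))) (by simp [h0])
  have hmemK : ∀ t, t ∈ c ↔ ∀ p ∈ info, t ∈ lckTok tail p := by
    intro t
    rw [hcm t]
    constructor
    · intro hall p hp
      exact hall (p.1, lckTok tail p) (List.mem_map_of_mem hp)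
    · intro hall q hq
      obtain ⟨p, hp, rfl⟩ := List.mem_map.1 hq
      exact hall p hp
  have hcontains : ∀ t, c.contains t = (lckCommon info tail).contains t := by
    intro t
    cases hb : (lckCommon info tail).contains t with
    | true => exact List.contains_iff_mem.2 ((hmemK t).2 ((lckCommon_mem info tail t h0).1 hb))
    | false =>
      by_contra hcc
      rw [Bool.not_eq_false] at hcc
      have := (lckCommon_mem info tail t h0).2 ((hmemK t).1 (List.contains_iff_mem.1 hcc))
      rw [this] at hb
      cases hb
  rw [lckKeys2]
  simp only [hK, hc]
  by_cases hce : c.isEmpty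
  · have hcnil : c = [] := List.isEmpty_iff.1 hce
    rw [if_neg (by simp [hce]), List.map_map]
    apply List.map_congr_left
    intro p _
    simp only [Function.comp]
    rw [lckName]
    have hfe : List.filter (fun t => !(lckCommon info tail).contains t) (lckTok tail p)
        = lckTok tail p := by
      apply List.filter_eq_self.2
      intro t _
      rw [← hcontains t, hcnil]
      rfl
    rw [hfe]
  · rw [if_pos (by simp [hce]), List.map_map]
    apply List.map_congr_left
    intro p _
    simp only [Function.comp]
    rw [lckName]
    have hgd : (Option.getD (some c) [] : PySem.Set String) = c := rfl
    rw [hgd]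
    have hft : List.filter (fun k => !c.contains k) (lckTok tail p)
        = List.filter (fun t => !(lckCommon info tail).contains t) (lckTok tail p) :=
      List.filter_congr (fun t _ => by rw [hcontains t])
    rw [hft]

-- B's out, canonically
theorem lckOut_eq (info : List (String × String)) (tail : String) :
    lckOut info tail
      = info.map (fun p => (p.1, (lckName info tail p, lckHad tail p, lckStrip tail p))) := by
  rw [lckOut, lckParts, List.map_map]; rfl

-- both empties counters = the same countP over info
theorem lckEmpties_eq (info : List (String × String)) (tail : String) (h0 : info ≠ []) :
    lckEmpties info tail = info.countP (fun p => lckName info tail p == "") := by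
  rw [lckEmpties, lckKeys2_eq info tail h0, ← List.countP_eq_length_filter, List.countP_map]
  rfl

theorem lckBlanks_eq (info : List (String × String)) (tail : String) :
    lckBlanks info tail = info.countP (fun p => lckName info tail p == "") := by
  rw [lckBlanks, lckOut_eq, ← List.countP_eq_length_filter, List.countP_map]
  rfl

-- final stage: re-append tail per entry; tails-set membership = this entry's endswith
theorem lck_final (info : List (String × String)) (tail : String)
    (h : (info.map Prod.fst).Nodup) (f : (String × String) → String × String)
    (G : (String × String) → String) (hf : ∀ p ∈ info, f p = (p.1, G p)) :
    List.map (fun p => (p.1, p.2 ++ (if PySem.Set.contains (lckTails info tail) p.1 then tail else "")))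
        (info.map f)
    = List.map (fun q => (q.1, q.2.1 ++ (if q.2.2.1 then tail else "")))
        (info.map (fun p => (p.1, (G p, lckHad tail p, lckStrip tail p)))) := by
  rw [List.map_map, List.map_map]
  apply List.map_congr_left
  intro p hp
  simp only [Function.comp]
  rw [hf p hp]
  have ht := lck_tails_mem info tail h p hp
  rw [ht]

-- ===== VERDICT (by name: the statement is the Claim_ definition above) =====
theorem leastcommonkeys_spec : Claim_equal_leastcommonkeys := by
  intro info tail _ hpre
  unfold Spec_leastcommonkeys
  unfold Pre_leastcommonkeys at hpre
  by_cases h1 : (info.length == 1) = true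
  · rw [leastcommonkeys, leastcommonkeys_alt, if_pos h1, if_pos h1]
  · by_cases h0 : info = []
    · subst h0; rfl
    · rw [leastcommonkeys, leastcommonkeys_alt, if_neg h1, if_neg h1]
      rw [lckKeys3, lckOut2, lckEmpties_eq info tail h0, lckBlanks_eq info tail,
        lckKeys2_eq info tail h0, lckOut_eq info tail]
      by_cases hE1 : (info.countP (fun p => lckName info tail p == "") == 1) = true
      · rw [if_pos hE1, if_pos hE1]
        have hcnt : (info.map (fun p => (p.1, lckName info tail p))).countP (fun p => p.2 == "") = 1 := by
          rw [List.countP_map]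
          simpa [Function.comp] using hE1
        rw [lckRefFirst_eq _ hcnt]
        have h2 : (info.map (fun p => (p.1, lckName info tail p))).map
            (fun p => if p.2 == "" then (p.1, "ref") else p)
            = info.map (fun p => (p.1, if lckName info tail p == "" then "ref" else lckName info tail p)) := by
          rw [List.map_map]
          apply List.map_congr_left
          intro p _
          simp only [Function.comp]
          by_cases hn : (lckName info tail p == "") = true
          · rw [if_pos hn, if_pos hn]
          · rw [if_neg hn, if_neg hn]
        have h3 : (info.map (fun p => (p.1, (lckName info tail p, lckHad tail p, lckStrip tail p)))).map
            (fun q => (q.1, ((if q.2.1 == "" then "ref" else q.2.1), q.2.2)))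
            = info.map (fun p => (p.1, ((if lckName info tail p == "" then "ref" else lckName info tail p),
                lckHad tail p, lckStrip tail p))) := by
          rw [List.map_map]
          rfl
        rw [h2, h3]
        exact lck_final info tail hpre _
          (fun p => if lckName info tail p == "" then "ref" else lckName info tail p) (fun p _ => rfl)
      · rw [if_neg hE1, if_neg hE1]
        by_cases hE2 : 1 < info.countP (fun p => lckName info tail p == "")
        · rw [if_pos hE2, if_pos hE2]
          have h2 : (info.map (fun p => (p.1, lckName info tail p))).map
              (fun p => if p.2 == "" then (p.1, (PySem.Dict.mk (lckDflt info tail)).getD p.1 "") else p)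
              = info.map (fun p => (p.1, if lckName info tail p == "" then lckStrip tail p
                  else lckName info tail p)) := by
            rw [List.map_map]
            apply List.map_congr_left
            intro p hp
            simp only [Function.comp]
            by_cases hn : (lckName info tail p == "") = true
            · rw [if_pos hn, if_pos hn, lckDflt,
                getD_mk_map (fun r => lckStrip tail r) "" info hpre p hp]
            · rw [if_neg hn, if_neg hn]
          have h3 : (info.map (fun p => (p.1, (lckName info tail p, lckHad tail p, lckStrip tail p)))).map
              (fun q => (q.1, ((if q.2.1 == "" then q.2.2.2 else q.2.1), q.2.2)))
              = info.map (fun p => (p.1, ((if lckName info tail p == "" then lckStrip tail p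
                  else lckName info tail p), lckHad tail p, lckStrip tail p))) := by
            rw [List.map_map]
            rfl
          rw [h2, h3]
          exact lck_final info tail hpre _
            (fun p => if lckName info tail p == "" then lckStrip tail p else lckName info tail p)
            (fun p _ => rfl)
        · rw [if_neg hE2, if_neg hE2]
          exact lck_final info tail hpre _ (fun p => lckName info tail p) (fun p _ => rfl)
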